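-- pv_equiv track=rewrite | github.com/Pulkinen/ClayMon | troubleshooter.py | merge_workers_config_gpu_setts
-- ===== SOURCE A (Python) =====
-- def get_rig_by_worker(worker):
--     widx = 'ABCDEFGH'.find(worker[-1])
--     rig = worker
--     if widx >= 0:
--         rig = worker[:-1]
--     return rig
--
-- def merge_workers_config_gpu_setts(config_snapshot):
--     rez = {}
--     for worker in config_snapshot:
--         rig = get_rig_by_worker(worker)
--         if not rig in rez:
--             rez[rig] = {}
--         bns = rez[rig]
--         cfg = config_snapshot[worker]
--         bns.update(cfg)
--     return rez
-- ===== SOURCE B (Python) =====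
-- def get_rig_by_worker(worker):
--     return worker[:-1] if worker and worker[-1] in 'ABCDEFGH' else worker
--
-- def merge_workers_config_gpu_setts(config_snapshot):
--     groups = {}
--     for worker in config_snapshot:
--         groups.setdefault(get_rig_by_worker(worker), []).append(worker)
--     rez = {}
--     for rig, workers in groups.items():
--         merged = {}
--         for w in workers:
--             merged.update(config_snapshot[w])
--         rez[rig] = merged
--     return rez
-- ===== Notes on version B (the rewrite author's own statement) =====
-- stated objective: alternative
-- what changed: A merges every worker's config into its rig's dict in one flat loop; B first builds a rig -> ordered worker-list grouping index, then in a second nested pass merges each group's configs per rig.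
-- crash fix: A raises IndexError (worker[-1]) when the snapshot contains an empty-string worker key; B returns the merged result treating '' as its own rig. — e.g. on merge_workers_config_gpu_setts([("", [("core", "1100")])]): A raises IndexError, B returns [("", [("core", "1100")])]
import Mathlib
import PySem

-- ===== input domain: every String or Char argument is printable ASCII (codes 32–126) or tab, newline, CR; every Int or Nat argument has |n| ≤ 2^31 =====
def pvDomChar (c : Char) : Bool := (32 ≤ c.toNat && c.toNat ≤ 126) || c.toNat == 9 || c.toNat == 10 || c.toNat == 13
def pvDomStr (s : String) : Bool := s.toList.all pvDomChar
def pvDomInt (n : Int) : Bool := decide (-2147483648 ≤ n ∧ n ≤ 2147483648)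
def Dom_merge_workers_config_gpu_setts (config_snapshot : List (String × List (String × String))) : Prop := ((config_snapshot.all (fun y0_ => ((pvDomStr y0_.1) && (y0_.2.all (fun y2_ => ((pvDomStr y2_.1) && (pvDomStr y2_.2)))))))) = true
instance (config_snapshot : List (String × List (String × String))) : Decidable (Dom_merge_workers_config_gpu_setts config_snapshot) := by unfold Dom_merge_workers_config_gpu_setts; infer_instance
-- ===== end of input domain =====

-- B replaces A's single flat merge loop by a two-phase decomposition (build a rig → workers
-- grouping index, then merge each group's configs per rig); objective: alternative structure, same cost.

-- ===== PORT A =====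
-- A's helper: widx = 'ABCDEFGH'.find(worker[-1]); worker[-1] on '' raises IndexError (excluded by Pre_)
def get_rig_by_worker_A (worker : String) : String :=
  match PySem.Str.pyGet? worker (-1) with
  | none => worker   -- Python raises IndexError here; such inputs are outside Pre_
  | some c =>
    let widx := PySem.Str.find "ABCDEFGH" (String.ofList [c])
    if 0 ≤ widx then PySem.Str.slice worker none (some (-1)) else worker

-- the parameter is a Python dict: decode the association list into a PySem.Dict once, then
-- transliterate A's loop over its keys (rez[rig] = {}; bns = rez[rig]; bns.update(cfg))
def merge_workers_config_gpu_setts (config_snapshot : List (String × List (String × String))) : List (String × List (String × String)) :=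
  let snap : PySem.Dict String (List (String × String)) := PySem.Dict.ofList config_snapshot
  let rez : PySem.Dict String (PySem.Dict String String) :=
    snap.items.foldl (fun rez p =>
      let rig := get_rig_by_worker_A p.1
      let rez := if rez.contains rig then rez else rez.insert rig PySem.Dict.empty
      let bns := rez.getD rig PySem.Dict.empty
      let cfg := snap.getD p.1 []
      rez.insert rig (bns.update cfg)) PySem.Dict.empty
  rez.items.map (fun q => (q.1, q.2.items))

-- ===== PORT B =====
-- B's helper: worker[:-1] if worker and worker[-1] in 'ABCDEFGH' else worker
def rig_of (worker : String) : String :=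
  match PySem.Str.pyGet? worker (-1) with
  | none => worker
  | some c =>
    if c ∈ "ABCDEFGH".toList then PySem.Str.slice worker none (some (-1)) else worker

def merge_workers_config_gpu_setts_alt (config_snapshot : List (String × List (String × String))) : List (String × List (String × String)) :=
  let snap : PySem.Dict String (List (String × String)) := PySem.Dict.ofList config_snapshot
  let groups : PySem.Dict String (List String) :=
    snap.items.foldl (fun g p => g.modify (rig_of p.1) [] (fun ws => ws ++ [p.1])) PySem.Dict.empty
  groups.items.map (fun q =>
    (q.1, (q.2.foldl (fun (m : PySem.Dict String String) w => m.update (snap.getD w [])) PySem.Dict.empty).items))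

-- ===== PRECONDITION & SPEC =====
-- Pre_ excludes snapshots containing an empty worker key, on which Python A raises IndexError (worker[-1]).
def Pre_merge_workers_config_gpu_setts (config_snapshot : List (String × List (String × String))) : Prop :=
  ∀ p ∈ config_snapshot, p.1 ≠ ""
instance (config_snapshot : List (String × List (String × String))) : Decidable (Pre_merge_workers_config_gpu_setts config_snapshot) := by unfold Pre_merge_workers_config_gpu_setts; infer_instance

def pvWitness_merge_workers_config_gpu_setts : (List (String × List (String × String))) :=
  [("rig1A", [("core", "1100"), ("mem", "2000")]), ("rig1B", [("mem", "2100")]), ("other", [])]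

-- A raises IndexError on snapshots containing an empty worker key; B returns the merged result,
-- treating '' as its own rig.
def Raises_merge_workers_config_gpu_setts (config_snapshot : List (String × List (String × String))) : Prop :=
  ∃ p ∈ config_snapshot, p.1 = ""
instance (config_snapshot : List (String × List (String × String))) : Decidable (Raises_merge_workers_config_gpu_setts config_snapshot) := by unfold Raises_merge_workers_config_gpu_setts; infer_instance
def pvRaiseWitness_merge_workers_config_gpu_setts : (List (String × List (String × String))) :=
  [("", [("core", "1100")])]
def pvRaiseWitnessOut_merge_workers_config_gpu_setts : List (String × List (String × String)) :=
  [("", [("core", "1100")])]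

def Spec_merge_workers_config_gpu_setts (config_snapshot : List (String × List (String × String))) (out : List (String × List (String × String))) : Prop := out = merge_workers_config_gpu_setts_alt config_snapshot
instance (config_snapshot : List (String × List (String × String))) (out : List (String × List (String × String))) : Decidable (Spec_merge_workers_config_gpu_setts config_snapshot out) := by unfold Spec_merge_workers_config_gpu_setts; infer_instance

-- ===== CLAIM (what is proved, stated in full; the proofs are below) =====
def Claim_equal_merge_workers_config_gpu_setts : Prop := ∀ (config_snapshot : List (String × List (String × String))), Dom_merge_workers_config_gpu_setts config_snapshot → Pre_merge_workers_config_gpu_setts config_snapshot → Spec_merge_workers_config_gpu_setts config_snapshot (merge_workers_config_gpu_setts config_snapshot)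

def Claim_raises_merge_workers_config_gpu_setts : Prop := (∀ (config_snapshot : List (String × List (String × String))), Dom_merge_workers_config_gpu_setts config_snapshot → Raises_merge_workers_config_gpu_setts config_snapshot → ¬ Pre_merge_workers_config_gpu_setts config_snapshot) ∧ (Dom_merge_workers_config_gpu_setts (pvRaiseWitness_merge_workers_config_gpu_setts) ∧ Raises_merge_workers_config_gpu_setts (pvRaiseWitness_merge_workers_config_gpu_setts) ∧ merge_workers_config_gpu_setts_alt (pvRaiseWitness_merge_workers_config_gpu_setts) = pvRaiseWitnessOut_merge_workers_config_gpu_setts)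

-- ===== LEMMAS AND PROOFS =====

-- the two rig helpers agree on every worker
lemma rig_helpers_eq (w : String) : get_rig_by_worker_A w = rig_of w := by
  unfold get_rig_by_worker_A rig_of
  cases h : PySem.Str.pyGet? w (-1) with
  | none => rfl
  | some c =>
    simp only []
    have hiff : (0 ≤ PySem.Str.find "ABCDEFGH" (String.ofList [c])) ↔ c ∈ "ABCDEFGH".toList := by
      rw [PySem.Str.find_nonneg_iff]
      constructor
      · intro h'
        have hsub := h'.sublist.subset
        apply hsub
        simp
      · intro h'
        obtain ⟨l1, l2, hl⟩ := List.append_of_mem h'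
        refine ⟨l1, l2, ?_⟩
        rw [hl]
        simp
    simp only [hiff]

-- the merged config of a group of workers, as B computes it
def pvMergeOf (snap : PySem.Dict String (List (String × String))) (ws : List String) : PySem.Dict String String :=
  ws.foldl (fun m w => m.update (snap.getD w [])) PySem.Dict.empty

def pvF (snap : PySem.Dict String (List (String × String))) :
    (String × List String) → String × PySem.Dict String String :=
  fun q => (q.1, pvMergeOf snap q.2)

lemma contains_map_snd (l : List (String × List String)) (snap) (k : String) :
    (PySem.Dict.mk (l.map (pvF snap))).contains k = (PySem.Dict.mk l).contains k := by
  simp [PySem.Dict.contains, List.any_map, Function.comp_def, pvF]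

lemma get?_map_snd (l : List (String × List String)) (snap) (k : String) :
    (PySem.Dict.mk (l.map (pvF snap))).get? k = ((PySem.Dict.mk l).get? k).map (pvMergeOf snap) := by
  simp only [PySem.Dict.get?]
  induction l with
  | nil => rfl
  | cons p t ih =>
    by_cases h : p.1 == k
    · simp [List.find?, pvF, h]
    · simpa [List.find?, pvF, h] using ih

lemma insert_map_snd (l : List (String × List String)) (snap) (k : String) (v : List String) :
    ((PySem.Dict.mk (l.map (pvF snap))).insert k (pvMergeOf snap v)).items
      = (((PySem.Dict.mk l).insert k v).items).map (pvF snap) := by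
  simp only [PySem.Dict.insert, contains_map_snd]
  by_cases h : (PySem.Dict.mk l).contains k
  · simp only [h, if_pos]
    simp only [List.map_map]
    apply List.map_congr_left
    intro q _
    by_cases hq : q.1 == k <;> simp [pvF, Function.comp, hq]
  · simp only [h, if_neg, Bool.false_eq_true, not_false_iff]
    simp [pvF]

lemma mergeOf_append (snap) (ws : List String) (w : String) :
    pvMergeOf snap (ws ++ [w]) = (pvMergeOf snap ws).update (snap.getD w []) := by
  simp [pvMergeOf]

lemma get?_none_of_not_contains {ν : Type} (d : PySem.Dict String ν) (k : String)
    (h : d.contains k = false) : d.get? k = none := by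
  simp only [PySem.Dict.get?, PySem.Dict.contains] at *
  rw [List.find?_eq_none.mpr]
  · rfl
  · intro p hp
    have := List.any_eq_false.mp h p hp
    simpa using this

-- the loop invariant: A's dict-so-far is B's grouping-so-far with each group merged
lemma step_invariant (snap) (p : String × List (String × String))
    (G : PySem.Dict String (List String)) :
    (let rez := PySem.Dict.mk (G.items.map (pvF snap))
     let rig := get_rig_by_worker_A p.1
     let rez' := if rez.contains rig then rez else rez.insert rig PySem.Dict.empty
     (rez'.insert rig ((rez'.getD rig PySem.Dict.empty).update (snap.getD p.1 []))).items)
      = ((G.modify (rig_of p.1) [] (fun ws => ws ++ [p.1])).items).map (pvF snap) := by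
  rw [← rig_helpers_eq]
  set rig := get_rig_by_worker_A p.1 with hrig
  simp only [PySem.Dict.modify]
  obtain ⟨gl⟩ := G
  by_cases h : (PySem.Dict.mk gl).contains rig
  · have hc : (PySem.Dict.mk (gl.map (pvF snap))).contains rig = true := by
      rw [contains_map_snd]; exact h
    simp only [hc, if_pos]
    -- contains true → get? is some
    obtain ⟨ws, hws⟩ : ∃ ws, (PySem.Dict.mk gl).get? rig = some ws := by
      simp only [PySem.Dict.get?]
      cases hf : gl.find? (fun p => p.1 == rig) with
      | none =>
        exfalso
        have hn := List.find?_eq_none.mp hf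
        simp only [PySem.Dict.contains, List.any_eq_true] at h
        obtain ⟨q, hq, hq2⟩ := h
        exact absurd hq2 (by simpa using hn q hq)
      | some r => exact ⟨r.2, by simp⟩
    have hgd : (PySem.Dict.mk (gl.map (pvF snap))).getD rig PySem.Dict.empty
        = pvMergeOf snap ws := by
      simp [PySem.Dict.getD, get?_map_snd, hws]
    have hgd2 : (PySem.Dict.mk gl).getD rig [] = ws := by simp [PySem.Dict.getD, hws]
    rw [hgd, hgd2, ← mergeOf_append]
    exact insert_map_snd gl snap rig (ws ++ [p.1])
  · have hc : (PySem.Dict.mk (gl.map (pvF snap))).contains rig = false := by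
      rw [contains_map_snd]; exact Bool.eq_false_iff.mpr h
    simp only [hc, Bool.false_eq_true, if_neg, not_false_iff]
    have hgd2 : (PySem.Dict.mk gl).getD rig [] = [] := by
      simp [PySem.Dict.getD, get?_none_of_not_contains _ _ (Bool.eq_false_iff.mpr h)]
    have h1 : ((PySem.Dict.mk (gl.map (pvF snap))).insert rig PySem.Dict.empty).getD rig PySem.Dict.empty = PySem.Dict.empty := by
      simp [PySem.Dict.getD, PySem.Dict.get?_insert_self]
    rw [h1, PySem.Dict.insert_insert_self, hgd2]
    have hm : (PySem.Dict.empty : PySem.Dict String String).update (snap.getD p.1 [])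
        = pvMergeOf snap ([] ++ [p.1]) := by simp [pvMergeOf, PySem.Dict.update]
    rw [hm]
    exact insert_map_snd gl snap rig ([] ++ [p.1])

lemma fold_invariant (snap) (l : List (String × List (String × String)))
    (G : PySem.Dict String (List String)) :
    (l.foldl (fun rez p =>
        let rig := get_rig_by_worker_A p.1
        let rez := if rez.contains rig then rez else rez.insert rig PySem.Dict.empty
        let bns := rez.getD rig PySem.Dict.empty
        let cfg := snap.getD p.1 []
        rez.insert rig (bns.update cfg)) (PySem.Dict.mk (G.items.map (pvF snap)))).items
      = ((l.foldl (fun g p => g.modify (rig_of p.1) [] (fun ws => ws ++ [p.1])) G).items).map (pvF snap) := by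
  induction l generalizing G with
  | nil => rfl
  | cons p t ih =>
    simp only [List.foldl_cons]
    have hstep := step_invariant snap p G
    simp only [] at hstep
    have hD : (let rig := get_rig_by_worker_A p.1
               let rez := if (PySem.Dict.mk (G.items.map (pvF snap))).contains rig then
                   (PySem.Dict.mk (G.items.map (pvF snap)))
                 else (PySem.Dict.mk (G.items.map (pvF snap))).insert rig PySem.Dict.empty
               rez.insert rig ((rez.getD rig PySem.Dict.empty).update (snap.getD p.1 [])))
        = PySem.Dict.mk ((G.modify (rig_of p.1) [] (fun ws => ws ++ [p.1])).items.map (pvF snap)) :=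
      PySem.Dict.ext hstep
    simp only [] at hD ⊢
    rw [hD]
    exact ih (G.modify (rig_of p.1) [] (fun ws => ws ++ [p.1]))

-- ===== VERDICT (by name: the statement is the Claim_ definition above) =====
theorem merge_workers_config_gpu_setts_spec : Claim_equal_merge_workers_config_gpu_setts := by
  intro cs _ _
  unfold Spec_merge_workers_config_gpu_setts
  unfold merge_workers_config_gpu_setts merge_workers_config_gpu_setts_alt
  simp only []
  have h := fold_invariant (PySem.Dict.ofList cs) (PySem.Dict.ofList cs).items PySem.Dict.empty
  have he : (PySem.Dict.mk (((PySem.Dict.empty : PySem.Dict String (List String)).items).map (pvF (PySem.Dict.ofList cs))))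
      = (PySem.Dict.empty : PySem.Dict String (PySem.Dict String String)) := rfl
  rw [he] at h
  rw [h, List.map_map]
  rfl

@[simp] theorem merge_workers_config_gpu_setts_raises : Claim_raises_merge_workers_config_gpu_setts := by
  unfold Claim_raises_merge_workers_config_gpu_setts
  constructor
  · rintro cs _ ⟨p, hp, hp1⟩ hpre
    exact hpre p hp hp1
  · exact ⟨by decide, by decide, by decide⟩
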